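-- pv_equiv track=rewrite | github.com/zcyisiee/ieeA | src/ieeA/translator/pipeline.py | _count_newline_breaks
-- ===== SOURCE A (Python) =====
-- def _count_newline_breaks(text: str) -> tuple[int, int]:
--     """Count newline breaks using greedy paragraph-first matching."""
--     sl_count = 0
--     pl_count = 0
--     i = 0
--     while i < len(text):
--         if text.startswith("\n\n", i):
--             pl_count += 1
--             i += 2
--             continue
--         if text[i] == "\n":
--             sl_count += 1
--         i += 1
--     return sl_count, pl_count
-- ===== SOURCE B (Python) =====
-- def _count_newline_breaks(text: str) -> tuple[int, int]:
--     """Count newline breaks by scanning maximal runs of equal characters."""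
--     sl_count = 0
--     pl_count = 0
--     i = 0
--     n = len(text)
--     while i < n:
--         c = text[i]
--         j = i + 1
--         while j < n and text[j] == c:
--             j += 1
--         if c == "\n":
--             run = j - i
--             pl_count += run // 2
--             sl_count += run % 2
--         i = j
--     return sl_count, pl_count
-- ===== Notes on version B (the rewrite author's own statement) =====
-- stated objective: alternative
-- what changed: B segments the text into maximal runs of equal characters and derives both counts arithmetically per newline run (pairs by integer division, a leftover single by the remainder), instead of A's greedy per-index prefix matching of the two-newline pattern.
import Mathlib
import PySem

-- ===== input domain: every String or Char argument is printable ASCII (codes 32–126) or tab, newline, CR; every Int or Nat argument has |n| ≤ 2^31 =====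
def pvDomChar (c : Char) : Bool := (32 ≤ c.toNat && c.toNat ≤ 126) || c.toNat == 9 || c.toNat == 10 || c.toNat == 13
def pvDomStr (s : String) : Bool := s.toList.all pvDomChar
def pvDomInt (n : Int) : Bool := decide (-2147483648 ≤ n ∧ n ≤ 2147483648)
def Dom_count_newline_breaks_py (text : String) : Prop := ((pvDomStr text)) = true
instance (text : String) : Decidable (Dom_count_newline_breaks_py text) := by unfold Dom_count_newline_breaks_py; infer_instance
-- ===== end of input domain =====

-- B replaces A's greedy per-index "\n\n" matching by a scan over maximal runs of equal
-- characters, deriving both counts arithmetically per newline run (objective: alternative).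

-- ===== PORT A =====
-- A's while loop: greedy check for "\n\n" at i (skip 2), else single '\n' (skip 1), else skip 1.
def pvGoA : List Char → Int → Int → Int × Int
  | [], sl, pl => (sl, pl)
  | c :: rest, sl, pl =>
    if c = '\n' then
      match rest with
      | c2 :: rest2 =>
        if c2 = '\n' then pvGoA rest2 sl (pl + 1)
        else pvGoA (c2 :: rest2) (sl + 1) pl
      | [] => pvGoA [] (sl + 1) pl
    else pvGoA rest sl pl
termination_by cs _ _ => cs.length

def count_newline_breaks_py (text : String) : Int × Int :=
  pvGoA text.toList 0 0

-- ===== PORT B =====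
-- B's outer while loop: one maximal run of equal characters per step.  The Python
-- `run // 2` / `run % 2` act on a positive int, so Nat division/mod here are exact.
def pvGoB : List Char → Int → Int → Int × Int
  | [], sl, pl => (sl, pl)
  | c :: rest, sl, pl =>
    let run := rest.takeWhile (fun x => x == c)
    let rest' := rest.dropWhile (fun x => x == c)
    if c = '\n' then
      pvGoB rest' (sl + (((run.length + 1) % 2 : Nat) : Int)) (pl + (((run.length + 1) / 2 : Nat) : Int))
    else pvGoB rest' sl pl
termination_by cs _ _ => cs.length
decreasing_by
  · exact Nat.lt_succ_of_le (rest.length_dropWhile_le _)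
  · exact Nat.lt_succ_of_le (rest.length_dropWhile_le _)

def count_newline_breaks_py_alt (text : String) : Int × Int :=
  pvGoB text.toList 0 0

-- ===== PRECONDITION & SPEC =====
def Spec_count_newline_breaks_py (text : String) (out : Int × Int) : Prop := out = count_newline_breaks_py_alt text
instance (text : String) (out : Int × Int) : Decidable (Spec_count_newline_breaks_py text out) := by unfold Spec_count_newline_breaks_py; infer_instance

-- ===== CLAIM (what is proved, stated in full; the proofs are below) =====
def Claim_equal_count_newline_breaks_py : Prop := ∀ (text : String), Dom_count_newline_breaks_py text → Spec_count_newline_breaks_py text (count_newline_breaks_py text)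

-- ===== LEMMAS AND PROOFS =====

theorem pvGoA_nil (sl pl : Int) : pvGoA [] sl pl = (sl, pl) := by
  conv_lhs => rw [pvGoA.eq_def]

theorem pvGoA_nl2 (r : List Char) (sl pl : Int) :
    pvGoA ('\n' :: '\n' :: r) sl pl = pvGoA r sl (pl + 1) := by
  conv_lhs => rw [pvGoA.eq_def]
  simp

theorem pvGoA_nl1 (c2 : Char) (r : List Char) (h : c2 ≠ '\n') (sl pl : Int) :
    pvGoA ('\n' :: c2 :: r) sl pl = pvGoA (c2 :: r) (sl + 1) pl := by
  conv_lhs => rw [pvGoA.eq_def]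
  simp [h]

theorem pvGoA_nl_nil (sl pl : Int) : pvGoA ['\n'] sl pl = pvGoA [] (sl + 1) pl := by
  conv_lhs => rw [pvGoA.eq_def]
  simp

theorem pvGoA_other (c : Char) (r : List Char) (h : c ≠ '\n') (sl pl : Int) :
    pvGoA (c :: r) sl pl = pvGoA r sl pl := by
  conv_lhs => rw [pvGoA.eq_def]
  simp [h]

theorem pvGoB_nil (sl pl : Int) : pvGoB [] sl pl = (sl, pl) := by
  conv_lhs => rw [pvGoB.eq_def]

theorem pvGoB_cons (c : Char) (rest : List Char) (sl pl : Int) :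
    pvGoB (c :: rest) sl pl =
      if c = '\n' then
        pvGoB (rest.dropWhile (fun x => x == c))
          (sl + (((rest.takeWhile (fun x => x == c)).length + 1) % 2 : Nat))
          (pl + (((rest.takeWhile (fun x => x == c)).length + 1) / 2 : Nat))
      else pvGoB (rest.dropWhile (fun x => x == c)) sl pl := by
  conv_lhs => rw [pvGoB.eq_def]

theorem pvGoA_skip (run : List Char) (rest : List Char) (h : ∀ x ∈ run, x ≠ '\n') :
    ∀ sl pl, pvGoA (run ++ rest) sl pl = pvGoA rest sl pl := by
  induction run with
  | nil => intro sl pl; rfl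
  | cons a t ih =>
    intro sl pl
    have ha : a ≠ '\n' := h a (List.mem_cons_self ..)
    have ht : ∀ x ∈ t, x ≠ '\n' := fun x hx => h x (List.mem_cons_of_mem _ hx)
    rw [List.cons_append, pvGoA_other a _ ha]
    exact ih ht sl pl

theorem pvGoA_runs (k : Nat) : ∀ rest sl pl, (∀ c, rest.head? = some c → c ≠ '\n') →
    pvGoA (List.replicate k '\n' ++ rest) sl pl
      = pvGoA rest (sl + ((k % 2 : Nat) : Int)) (pl + ((k / 2 : Nat) : Int)) := by
  induction k using Nat.twoStepInduction with
  | zero => intro rest sl pl _; simp [List.replicate]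
  | one =>
    intro rest sl pl h
    cases rest with
    | nil => simp [List.replicate, pvGoA_nl_nil]
    | cons c2 rest2 =>
      have hc2 : c2 ≠ '\n' := h c2 rfl
      simp [List.replicate, pvGoA_nl1 c2 rest2 hc2]
  | more k ih _ =>
    intro rest sl pl h
    have hrep : List.replicate (k + 2) '\n' ++ rest
        = '\n' :: '\n' :: (List.replicate k '\n' ++ rest) := by
      simp [List.replicate_succ]
    rw [hrep, pvGoA_nl2, ih rest sl (pl + 1) h]
    have h1 : sl + ((k % 2 : Nat) : Int) = sl + (((k + 2) % 2 : Nat) : Int) := by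
      push_cast; omega
    have h2 : pl + 1 + ((k / 2 : Nat) : Int) = pl + (((k + 2) / 2 : Nat) : Int) := by
      push_cast; omega
    rw [h1, h2]

theorem pvDropWhile_head (p : Char → Bool) : ∀ (l : List Char) c,
    (l.dropWhile p).head? = some c → p c = false := by
  intro l
  induction l with
  | nil => intro c h; simp [List.dropWhile] at h
  | cons a t ih =>
    intro c h
    by_cases hp : p a
    · rw [List.dropWhile_cons_of_pos hp] at h; exact ih c h
    · rw [List.dropWhile_cons_of_neg hp] at h
      simp at h
      subst h
      simpa using hp

theorem pvGoAB (n : Nat) : ∀ cs : List Char, cs.length ≤ n →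
    ∀ sl pl, pvGoA cs sl pl = pvGoB cs sl pl := by
  induction n with
  | zero =>
    intro cs h sl pl
    have : cs = [] := List.eq_nil_of_length_eq_zero (Nat.le_zero.mp h)
    subst this
    rw [pvGoA_nil, pvGoB_nil]
  | succ n ih =>
    intro cs h sl pl
    cases cs with
    | nil => rw [pvGoA_nil, pvGoB_nil]
    | cons c rest =>
      have hsplit : rest.takeWhile (fun x => x == c) ++ rest.dropWhile (fun x => x == c) = rest :=
        rest.takeWhile_append_dropWhile
      have hrun : ∀ x ∈ rest.takeWhile (fun x => x == c), x = c := by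
        intro x hx
        have := List.mem_takeWhile_imp hx
        simpa using this
      have hlen' : (rest.dropWhile (fun x => x == c)).length ≤ n := by
        have := rest.length_dropWhile_le (fun x => x == c)
        simp at h; omega
      have hhead : ∀ d, (rest.dropWhile (fun x => x == c)).head? = some d → d ≠ c := by
        intro d hd
        have := pvDropWhile_head (fun x => x == c) rest d hd
        simpa using this
      by_cases hc : c = '\n'
      · subst hc
        have hrep : rest.takeWhile (fun x => x == '\n')
            = List.replicate (rest.takeWhile (fun x => x == '\n')).length '\n' :=
          List.eq_replicate_length.mpr hrun
        have hcs : '\n' :: rest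
            = List.replicate ((rest.takeWhile (fun x => x == '\n')).length + 1) '\n'
              ++ rest.dropWhile (fun x => x == '\n') := by
          rw [List.replicate_succ]
          simp only [List.cons_append]
          rw [← hrep, hsplit]
        conv_lhs => rw [hcs]
        rw [pvGoA_runs _ _ _ _ hhead, ih _ hlen', pvGoB_cons]
        simp
      · have hcs : c :: rest
            = (c :: rest.takeWhile (fun x => x == c)) ++ rest.dropWhile (fun x => x == c) := by
          simp [hsplit]
        have hnot : ∀ x ∈ c :: rest.takeWhile (fun x => x == c), x ≠ '\n' := by
          intro x hx
          rcases List.mem_cons.mp hx with h1 | h1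
          · subst h1; exact hc
          · rw [hrun x h1]; exact hc
        conv_lhs => rw [hcs]
        rw [pvGoA_skip _ _ hnot, ih _ hlen', pvGoB_cons]
        simp [hc]

-- ===== VERDICT (by name: the statement is the Claim_ definition above) =====
theorem count_newline_breaks_py_spec : Claim_equal_count_newline_breaks_py := by
  intro text _
  unfold Spec_count_newline_breaks_py count_newline_breaks_py count_newline_breaks_py_alt
  exact pvGoAB text.toList.length text.toList le_rfl 0 0
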